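-- pv_equiv track=rewrite | github.com/VamP08/Uni-Work | SEM-4/Computer Networks/ASSIGNMENT - 7/program2.py | bit_stuffing
-- ===== SOURCE A (Python) =====
-- def bit_stuffing(frame):
--     stuffed_frame = []
--     count = 0
--     for bit in frame:
--         if bit == '1':
--             count += 1
--         else:
--             count = 0
--         stuffed_frame.append(bit)
--         if count == 5:
--             stuffed_frame.append('0')
--             count = 0
--     return ''.join(stuffed_frame)
-- ===== SOURCE B (Python) =====
-- def bit_stuffing(frame):
--     # str.replace scans left to right and continues AFTER each replacement,
--     # so every 5th consecutive '1' gets a '0' stuffed after it, exactly as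
--     # the counter-based loop does; any other character breaks the pattern.
--     return frame.replace('11111', '111110')
-- ===== Notes on version B (the rewrite author's own statement) =====
-- stated objective: idiomatic
-- what changed: Replaces the explicit per-character counter loop with a single str.replace('11111','111110'), whose left-to-right non-overlapping scan performs exactly the same stuffing.
import Mathlib
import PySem

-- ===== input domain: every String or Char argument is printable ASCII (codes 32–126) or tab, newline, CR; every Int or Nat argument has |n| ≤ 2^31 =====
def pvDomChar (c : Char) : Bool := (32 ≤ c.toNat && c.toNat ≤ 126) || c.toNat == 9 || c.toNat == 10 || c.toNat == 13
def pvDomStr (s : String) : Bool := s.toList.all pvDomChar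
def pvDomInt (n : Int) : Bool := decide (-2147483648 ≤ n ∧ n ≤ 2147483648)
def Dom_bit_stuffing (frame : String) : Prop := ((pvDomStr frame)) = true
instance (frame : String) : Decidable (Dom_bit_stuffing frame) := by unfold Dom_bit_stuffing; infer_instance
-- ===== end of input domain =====

-- B replaces A's per-character counter loop with one str.replace('11111','111110'); return value proved identical on all inputs.

-- ===== PORT A =====
-- one iteration of A's for-loop: state = (stuffed_frame so far, count)
def bit_stuffing_step (st : List Char × Nat) (bit : Char) : List Char × Nat :=
  let count := if bit = '1' then st.2 + 1 else 0
  let sf := st.1 ++ [bit]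
  if count = 5 then (sf ++ ['0'], 0) else (sf, count)

def bit_stuffing (frame : String) : String :=
  String.ofList (frame.toList.foldl bit_stuffing_step ([], 0)).1

-- ===== PORT B =====
def bit_stuffing_alt (frame : String) : String :=
  PySem.Str.replace frame "11111" "111110"

-- ===== PRECONDITION & SPEC =====
def Spec_bit_stuffing (frame : String) (out : String) : Prop := out = bit_stuffing_alt frame
instance (frame : String) (out : String) : Decidable (Spec_bit_stuffing frame out) := by unfold Spec_bit_stuffing; infer_instance

-- ===== CLAIM (what is proved, stated in full; the proofs are below) =====
def Claim_equal_bit_stuffing : Prop := ∀ (frame : String), Dom_bit_stuffing frame → Spec_bit_stuffing frame (bit_stuffing frame)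

-- ===== LEMMAS AND PROOFS =====

-- length of the leading run of '1's
def pvLeadOnes : List Char → Nat
  | [] => 0
  | c :: t => if c = '1' then pvLeadOnes t + 1 else 0

-- n ones at the front means replicate n '1' is a prefix
theorem pv_lead_prefix : ∀ (l : List Char) (n : Nat), n ≤ pvLeadOnes l → List.replicate n '1' <+: l := by
  intro l
  induction l with
  | nil =>
    intro n h
    simp [pvLeadOnes] at h
    subst h; simp
  | cons b t ih =>
    intro n h
    cases n with
    | zero => simp
    | succ m =>
      by_cases hb : b = '1'
      · subst hb
        simp [pvLeadOnes] at h
        have hm := ih m (by omega)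
        rw [List.replicate_succ]
        exact List.cons_prefix_cons.mpr ⟨rfl, hm⟩
      · simp [pvLeadOnes, hb] at h

-- main invariant: A's loop from state (acc, c) produces what replace.go produces
theorem pv_main : ∀ (fuel : Nat) (l : List Char) (acc : List Char) (c : Nat),
    l.length ≤ fuel → c < 5 → (0 < c → c + pvLeadOnes l < 5) →
    (l.foldl bit_stuffing_step (acc, c)).1 =
      PySem.Chars.replace.go ['1','1','1','1','1'] ['1','1','1','1','1','0'] fuel l acc.reverse := by
  intro fuel
  induction fuel with
  | zero =>
    intro l acc c hl _ _
    have hnil : l = [] := List.eq_nil_of_length_eq_zero (Nat.le_zero.mp hl)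
    subst hnil
    rw [PySem.Chars.replace.go]; simp
  | succ f ih =>
    intro l acc c hl hc hinv
    match l with
    | [] => rw [PySem.Chars.replace.go]; simp; omega
    | b :: t =>
      rw [PySem.Chars.replace.go]
      by_cases hp : List.isPrefixOf ['1','1','1','1','1'] (b :: t) = true
      · -- five ones at the head: A stuffs a '0' after them, go jumps past them
        obtain ⟨rest, hrest⟩ := List.isPrefixOf_iff_prefix.mp hp
        have hc0 : c = 0 := by
          by_contra hne
          have h5 : 5 ≤ pvLeadOnes (b :: t) := by
            rw [← hrest]; simp [pvLeadOnes]
          have := hinv (by omega)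
          omega
        subst hc0
        rw [← hrest]
        have hlen : rest.length ≤ f := by
          have := hl; rw [← hrest] at this; simp at this; omega
        have := ih rest (acc ++ ['1','1','1','1','1','0']) 0 hlen (by omega) (by omega)
        simpa [bit_stuffing_step, hp] using this
      · by_cases hb : b = '1'
        · -- a '1' that does not start a run of five: count goes up by one
          subst hb
          have hlead : pvLeadOnes t ≤ 3 := by
            by_contra hgt
            exact hp (List.isPrefixOf_iff_prefix.mpr
              (by simpa [List.replicate_succ] using
                pv_lead_prefix ('1' :: t) 5 (by simp [pvLeadOnes]; omega)))
          have hc1 : c + 1 < 5 := by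
            by_cases h0 : 0 < c
            · have := hinv h0; simp [pvLeadOnes] at this; omega
            · omega
          have := ih t (acc ++ ['1']) (c + 1) (by simpa using Nat.lt_succ_iff.mp (by simpa using hl)) hc1
            (by intro _; simp [pvLeadOnes] at hinv ⊢; omega)
          simpa [bit_stuffing_step, hp, Nat.ne_of_lt hc1] using this
        · -- any other character resets the counter
          have := ih t (acc ++ [b]) 0 (by simpa using Nat.lt_succ_iff.mp (by simpa using hl)) (by omega) (by omega)
          simpa [bit_stuffing_step, hp, hb] using this

theorem bit_stuffing_spec : Claim_equal_bit_stuffing := by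
  intro frame _
  unfold Spec_bit_stuffing bit_stuffing bit_stuffing_alt PySem.Str.replace PySem.Chars.replace
  have hold : "11111".toList = ['1','1','1','1','1'] := by decide
  have hnew : "111110".toList = ['1','1','1','1','1','0'] := by decide
  rw [hold, hnew]
  rw [if_neg (by decide : ¬(List.isEmpty (['1','1','1','1','1'] : List Char) = true))]
  have := pv_main frame.toList.length frame.toList [] 0 le_rfl (by omega) (by omega)
  simp only [List.reverse_nil] at this
  rw [this]
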